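-- pv_equiv track=rewrite | github.com/MrHamdulay/csc3-capstone | examples/data/Assignment_4/rbnsha013/boxes.py | get_rectangle
-- ===== SOURCE A (Python) =====
-- def get_rectangle(width,height):
--     rectangle = ""
--     for i in range(height):
--         if i==0:
--             rectangle = rectangle+"*"*width+"\n"
--         elif i==(height-1):
--             rectangle = rectangle+"*"*width
--         elif 0<i<(height-1):
--             rectangle = rectangle+"*"+" "*(width-2)+"*"+"\n"
--     return rectangle
-- ===== SOURCE B (Python) =====
-- def get_rectangle(width, height):
--     # Build the box out of three blocks with string multiplication (no per-row loop).
--     if height <= 0: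
--         return ""
--     top = "*" * width + "\n"
--     if height == 1:
--         return top
--     middle = ("*" + " " * (width - 2) + "*" + "\n") * (height - 2)
--     bottom = "*" * width
--     return top + middle + bottom
-- ===== Notes on version B (the rewrite author's own statement) =====
-- stated objective: faster
-- what changed: Replaces the per-row loop that repeatedly re-concatenates the growing string with three string-multiplication blocks (top line, repeated middle row, bottom line) joined once.
import Mathlib
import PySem

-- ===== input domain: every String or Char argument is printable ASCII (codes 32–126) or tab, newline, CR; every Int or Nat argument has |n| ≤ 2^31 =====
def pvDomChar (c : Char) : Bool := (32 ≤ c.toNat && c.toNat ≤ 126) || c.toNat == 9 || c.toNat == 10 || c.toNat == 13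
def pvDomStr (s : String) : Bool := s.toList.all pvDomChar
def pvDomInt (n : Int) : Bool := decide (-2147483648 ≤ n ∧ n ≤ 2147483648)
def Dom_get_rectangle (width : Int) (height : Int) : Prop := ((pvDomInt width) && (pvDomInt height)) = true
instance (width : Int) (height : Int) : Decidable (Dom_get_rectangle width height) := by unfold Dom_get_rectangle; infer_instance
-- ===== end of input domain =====

-- B builds the box out of three blocks (top line, repeated middle row, bottom line)
-- instead of A's per-row loop; objective: simpler.
-- Python's "s" * n (empty for n ≤ 0) is ported exactly as List.replicate n.toNat.

-- ===== PORT A =====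
-- the step function of A's for-loop over range(height), on List Char
def pvRowStep (width : Int) (height : Int) (rectangle : List Char) (i : Int) : List Char :=
  if i = 0 then rectangle ++ List.replicate width.toNat '*' ++ ['\n']
  else if i = height - 1 then rectangle ++ List.replicate width.toNat '*'
  else if 0 < i ∧ i < height - 1 then
    rectangle ++ ['*'] ++ List.replicate (width - 2).toNat ' ' ++ ['*'] ++ ['\n']
  else rectangle

def get_rectangle (width : Int) (height : Int) : String :=
  String.ofList ((PySem.List.pyRange 0 height 1).foldl (pvRowStep width height) [])

-- ===== PORT B =====
def get_rectangle_alt (width : Int) (height : Int) : String :=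
  if height ≤ 0 then ""
  else
    let top : List Char := List.replicate width.toNat '*' ++ ['\n']
    if height = 1 then String.ofList top
    else
      let mid : List Char := ['*'] ++ List.replicate (width - 2).toNat ' ' ++ ['*'] ++ ['\n']
      String.ofList (top ++ (List.replicate (height - 2).toNat mid).flatten
                     ++ List.replicate width.toNat '*')

-- ===== PRECONDITION & SPEC =====
def Spec_get_rectangle (width : Int) (height : Int) (out : String) : Prop := out = get_rectangle_alt width height
instance (width : Int) (height : Int) (out : String) : Decidable (Spec_get_rectangle width height out) := by unfold Spec_get_rectangle; infer_instance

-- ===== CLAIM (what is proved, stated in full; the proofs are below) =====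
def Claim_equal_get_rectangle : Prop := ∀ (width : Int) (height : Int), Dom_get_rectangle width height → Spec_get_rectangle width height (get_rectangle width height)

-- ===== LEMMAS AND PROOFS =====

-- After processing indices 0..k-1 (1 ≤ k ≤ height-1), A's accumulator is the top line
-- followed by k-1 middle rows.
lemma pvFold_prefix (width height : Int) :
    ∀ k : Nat, 1 ≤ k → (k : Int) ≤ height - 1 →
      (PySem.List.pyRange 0 (k : Int) 1).foldl (pvRowStep width height) [] =
        (List.replicate width.toNat '*' ++ ['\n']) ++
        (List.replicate (k - 1)
          (['*'] ++ List.replicate (width - 2).toNat ' ' ++ ['*'] ++ ['\n'])).flatten := by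
  intro k
  induction k with
  | zero => intro h; omega
  | succ n ih =>
    intro _ hle
    by_cases hn : 1 ≤ n
    · have hcast : ((n + 1 : Nat) : Int) = (n : Int) + 1 := by push_cast; ring
      rw [hcast, PySem.List.pyRange_one_succ_right (by positivity), List.foldl_append,
        ih hn (by omega)]
      have h0 : ¬ ((n : Int) = 0) := by omega
      have h1 : ¬ ((n : Int) = height - 1) := by omega
      have h2 : 0 < (n : Int) ∧ (n : Int) < height - 1 := by constructor <;> omega
      simp only [List.foldl_cons, List.foldl_nil, pvRowStep, if_neg h0, if_neg h1, if_pos h2]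
      have : n + 1 - 1 = (n - 1) + 1 := by omega
      rw [this, List.replicate_succ', List.flatten_append]
      simp [List.append_assoc]
    · have hn0 : n = 0 := by omega
      subst hn0
      have hr : PySem.List.pyRange 0 ((0 + 1 : Nat) : Int) 1 = [0] := by decide
      rw [hr]
      simp [pvRowStep]

-- ===== VERDICT (by name: the statement is the Claim_ definition above) =====
theorem get_rectangle_spec : Claim_equal_get_rectangle := by
  unfold Claim_equal_get_rectangle
  intro width height _
  unfold Spec_get_rectangle get_rectangle get_rectangle_alt
  by_cases h0 : height ≤ 0
  · rw [PySem.List.pyRange_one_eq_nil h0, if_pos h0]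
    rfl
  · rw [if_neg h0]
    by_cases h1 : height = 1
    · subst h1
      rw [if_pos rfl, show PySem.List.pyRange 0 1 1 = [0] from by decide]
      simp [pvRowStep]
    · rw [if_neg h1]
      have hh : 2 ≤ height := by omega
      have hsplit : PySem.List.pyRange 0 height 1 =
          PySem.List.pyRange 0 (height - 1) 1 ++ [height - 1] := by
        have := PySem.List.pyRange_one_succ_right (a := 0) (b := height - 1) (by omega)
        simpa using this
      set k : Nat := (height - 1).toNat with hk
      have hkcast : (k : Int) = height - 1 := by omega
      rw [hsplit, List.foldl_append, ← hkcast,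
        pvFold_prefix width height k (by omega) (by omega)]
      have hk2 : k - 1 = (height - 2).toNat := by omega
      simp only [List.foldl_cons, List.foldl_nil, pvRowStep, hk2]
      rw [if_neg (show ¬((k : Int) = 0) from by omega), if_pos hkcast]
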